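-- pv_equiv track=rewrite | github.com/OriShapira/ENDow | run_inference_qaconv.py | __get_transcript_chunk
-- ===== SOURCE A (Python) =====
-- def __get_transcript_chunk(transcript_utterances, start_idx, max_len):
--     chunk_str = ''
--     chunk_token_len = 0
--     last_utt_idx = -1
--     for utt_idx_relative, utt in enumerate(transcript_utterances[start_idx:]):
--         utt_token_len = len(utt.split())
--         if chunk_token_len + utt_token_len >= max_len:
--             break  # don't add this chunk because it will cause surpassing of the max_len
--         chunk_str += '\n' + utt
--         chunk_token_len += utt_token_len
--         last_utt_idx = start_idx + utt_idx_relative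
--     return chunk_str, last_utt_idx
-- ===== SOURCE B (Python) =====
-- def __get_transcript_chunk(transcript_utterances, start_idx, max_len):
--     tail = transcript_utterances[start_idx:]
--     # prefix-sum table of token lengths
--     cum = []
--     total = 0
--     for u in tail:
--         total += len(u.split())
--         cum.append(total)
--     # sums are nondecreasing, so the utterances that fit are exactly those
--     # whose prefix sum stays below max_len
--     count = sum(1 for c in cum if c < max_len)
--     chunk_str = ''.join('\n' + u for u in tail[:count])
--     last_utt_idx = start_idx + count - 1 if count else -1
--     return chunk_str, last_utt_idx
-- ===== Notes on version B (the rewrite author's own statement) =====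
-- stated objective: alternative
-- what changed: Replaces the accumulate-and-break loop carrying chunk string/length/last-index state by a prefix-sum table of token lengths, a count of sums below max_len, and a single join of exactly the fitting utterances.
import Mathlib
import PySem

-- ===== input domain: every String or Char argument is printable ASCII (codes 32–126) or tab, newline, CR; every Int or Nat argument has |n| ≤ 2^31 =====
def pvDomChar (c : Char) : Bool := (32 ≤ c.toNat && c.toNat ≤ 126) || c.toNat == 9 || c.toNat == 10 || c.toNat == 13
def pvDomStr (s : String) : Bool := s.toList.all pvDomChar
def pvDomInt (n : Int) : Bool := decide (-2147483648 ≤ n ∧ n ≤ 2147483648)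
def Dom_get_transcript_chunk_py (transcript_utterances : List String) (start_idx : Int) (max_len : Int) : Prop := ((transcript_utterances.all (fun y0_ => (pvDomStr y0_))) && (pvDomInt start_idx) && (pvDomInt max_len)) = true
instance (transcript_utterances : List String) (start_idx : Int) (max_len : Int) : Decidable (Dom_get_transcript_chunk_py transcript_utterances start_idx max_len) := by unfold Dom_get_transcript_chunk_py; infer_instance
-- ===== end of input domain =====

-- B replaces A's accumulate-and-break loop by a prefix-sum table of token lengths,
-- a count of the sums below max_len, and one join of exactly the fitting utterances.

-- ===== PORT A =====
-- the for-loop with break, carrying (chunk_str, chunk_token_len, last_utt_idx); i is enumerate's counter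
def gtcLoopA (start_idx max_len : Int) : List String → Nat → String → Int → Int → String × Int
  | [], _, chunk_str, _, last_utt_idx => (chunk_str, last_utt_idx)
  | utt :: rest, i, chunk_str, chunk_token_len, last_utt_idx =>
    let utt_token_len : Int := ((PySem.Str.split₀ utt).length : Int)
    if chunk_token_len + utt_token_len ≥ max_len then (chunk_str, last_utt_idx)
    else gtcLoopA start_idx max_len rest (i + 1) (chunk_str ++ "\n" ++ utt)
           (chunk_token_len + utt_token_len) (start_idx + (i : Int))

def get_transcript_chunk_py (transcript_utterances : List String) (start_idx : Int) (max_len : Int) : String × Int :=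
  gtcLoopA start_idx max_len (PySem.List.slice transcript_utterances (some start_idx) none) 0 "" 0 (-1)

-- ===== PORT B =====
def get_transcript_chunk_py_alt (transcript_utterances : List String) (start_idx : Int) (max_len : Int) : String × Int :=
  let tail := PySem.List.slice transcript_utterances (some start_idx) none
  let cum := (tail.foldl (fun (p : List Int × Int) u =>
      let t := p.2 + ((PySem.Str.split₀ u).length : Int); (p.1 ++ [t], t)) ([], 0)).1
  let count := cum.countP (fun c => decide (c < max_len))
  let chunk_str := PySem.Str.join "" ((tail.take count).map (fun u => "\n" ++ u))
  let last_utt_idx := if count ≠ 0 then start_idx + (count : Int) - 1 else -1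
  (chunk_str, last_utt_idx)

-- ===== PRECONDITION & SPEC =====
def Spec_get_transcript_chunk_py (transcript_utterances : List String) (start_idx : Int) (max_len : Int) (out : String × Int) : Prop := out = get_transcript_chunk_py_alt transcript_utterances start_idx max_len
instance (transcript_utterances : List String) (start_idx : Int) (max_len : Int) (out : String × Int) : Decidable (Spec_get_transcript_chunk_py transcript_utterances start_idx max_len out) := by unfold Spec_get_transcript_chunk_py; infer_instance

-- ===== CLAIM (what is proved, stated in full; the proofs are below) =====
def Claim_equal_get_transcript_chunk_py : Prop := ∀ (transcript_utterances : List String) (start_idx : Int) (max_len : Int), Dom_get_transcript_chunk_py transcript_utterances start_idx max_len → Spec_get_transcript_chunk_py transcript_utterances start_idx max_len (get_transcript_chunk_py transcript_utterances start_idx max_len)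

-- ===== LEMMAS AND PROOFS =====

-- prefix sums of l starting from t
def cumFrom (t : Int) : List Int → List Int
  | [] => []
  | x :: xs => (t + x) :: cumFrom (t + x) xs

theorem foldl_cum (l : List String) (acc : List Int) (t : Int) :
    (l.foldl (fun (p : List Int × Int) u =>
      let t := p.2 + ((PySem.Str.split₀ u).length : Int); (p.1 ++ [t], t)) (acc, t)).1
    = acc ++ cumFrom t (l.map (fun u => ((PySem.Str.split₀ u).length : Int))) := by
  induction l generalizing acc t with
  | nil => simp [cumFrom]
  | cons u rest ih => simp [List.foldl_cons, ih, cumFrom]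

theorem cumFrom_ge (l : List Int) (t : Int) (hl : ∀ z ∈ l, 0 ≤ z) :
    ∀ y ∈ cumFrom t l, t ≤ y := by
  induction l generalizing t with
  | nil => simp [cumFrom]
  | cons x xs ih =>
    intro y hy
    have hx : 0 ≤ x := hl x (by simp)
    simp only [cumFrom, List.mem_cons] at hy
    rcases hy with h | h
    · omega
    · have := ih (t + x) (fun z hz => hl z (by simp [hz])) y h; omega

theorem countP_cumFrom_zero (l : List Int) (t ml : Int)
    (h : ∀ y ∈ cumFrom t l, ¬ y < ml) :
    (cumFrom t l).countP (fun c => decide (c < ml)) = 0 := by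
  rw [List.countP_eq_length_filter, List.length_eq_zero_iff, List.filter_eq_nil_iff]
  intro y hy
  simpa using h y hy

theorem intercalate_nil_sep (l : List (List Char)) :
    ([] : List Char).intercalate l = l.flatten := by
  induction l with
  | nil => simp [List.intercalate]
  | cons x xs ih =>
    cases xs with
    | nil => simp [List.intercalate]
    | cons y ys =>
      simp only [List.intercalate] at *
      simp [List.intersperse, List.flatten] at *
      simpa using ih

theorem join_empty_cons (s : String) (rest : List String) :
    PySem.Str.join "" (s :: rest) = s ++ PySem.Str.join "" rest := by
  apply String.ext
  simp [PySem.Str.toList_join, PySem.Chars.join, intercalate_nil_sep]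

theorem gtcLoopA_eq (ml : Int) (l : List String) (si : Int) (i : Nat) (cs : String) (tl last : Int) :
    gtcLoopA si ml l i cs tl last =
      (cs ++ PySem.Str.join ""
        ((l.take ((cumFrom tl (l.map (fun u => ((PySem.Str.split₀ u).length : Int)))).countP
            (fun c => decide (c < ml)))).map (fun u => "\n" ++ u)),
       if (cumFrom tl (l.map (fun u => ((PySem.Str.split₀ u).length : Int)))).countP
            (fun c => decide (c < ml)) = 0 then last
       else si + (i : Int) +
            ((cumFrom tl (l.map (fun u => ((PySem.Str.split₀ u).length : Int)))).countP
              (fun c => decide (c < ml)) : Int) - 1) := by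
  induction l generalizing i cs tl last with
  | nil =>
    simp [gtcLoopA, cumFrom, PySem.Str.join]
  | cons u rest ih =>
    simp only [gtcLoopA, List.map_cons, cumFrom]
    set lu : Int := ((PySem.Str.split₀ u).length : Int) with hlu
    by_cases hbr : tl + lu ≥ ml
    · rw [if_pos hbr]
      have hnz : ∀ y ∈ cumFrom tl ((u :: rest).map (fun u => ((PySem.Str.split₀ u).length : Int))), ¬ y < ml := by
        intro y hy
        have hge := cumFrom_ge (rest.map (fun u => ((PySem.Str.split₀ u).length : Int))) (tl + lu)
          (by intro z hz; simp only [List.mem_map] at hz; obtain ⟨w, _, rfl⟩ := hz; positivity)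
        simp only [List.map_cons, cumFrom, List.mem_cons] at hy
        rcases hy with h | h
        · omega
        · have := hge y h; omega
      have h0 : (cumFrom tl ((u :: rest).map (fun u => ((PySem.Str.split₀ u).length : Int)))).countP
          (fun c => decide (c < ml)) = 0 :=
        countP_cumFrom_zero _ _ _ hnz
      simp only [List.map_cons, cumFrom] at h0
      rw [h0]
      simp [PySem.Str.join]
    · rw [if_neg hbr]
      have hbr' : tl + lu < ml := by omega
      rw [ih, List.countP_cons]
      rw [show (decide (tl + lu < ml)) = true by simpa using hbr']
      set c' := (cumFrom (tl + lu) (rest.map (fun u => ((PySem.Str.split₀ u).length : Int)))).countP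
          (fun c => decide (c < ml)) with hc'
      simp only [if_true, Prod.mk.injEq]
      constructor
      · rw [List.take_succ_cons, List.map_cons, join_empty_cons]
        rw [String.append_assoc, String.append_assoc]
        rw [String.append_assoc]
      · by_cases hz : c' = 0
        · simp [hz]
        · rw [if_neg hz, if_neg (by omega)]
          push_cast; ring

-- ===== VERDICT (by name: the statement is the Claim_ definition above) =====
theorem get_transcript_chunk_py_spec : Claim_equal_get_transcript_chunk_py := by
  intro ts si ml _
  show _ = _
  unfold get_transcript_chunk_py get_transcript_chunk_py_alt
  simp only [gtcLoopA_eq, foldl_cum, List.nil_append, Int.natCast_zero, add_zero, Prod.mk.injEq]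
  constructor
  · apply String.ext; simp
  · split_ifs with h1 h2 <;> simp_all
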